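-- pv_equiv track=rewrite | github.com/Refeat/refeat_AI | src/models/chunker/text_splitter.py | find_chunk_by_index
-- ===== SOURCE A (Python) =====
-- def find_chunk_by_index(chunk_list, index):
--     """
--     chunk list에서 token index를 기준으로 해당 index가 속한 chunk의 index를 구함
--     """
--     accumulated_count = 0
--     for chunk_idx, chunk in enumerate(chunk_list):
--         count = chunk['token_num']
--         accumulated_count += count
--         if accumulated_count > index:
--             return chunk_idx
--     return None
-- ===== SOURCE B (Python) =====
-- def find_chunk_by_index(chunk_list, index):
--     """
--     Two-pass re-implementation: build the table of cumulative token counts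
--     first, then search it for the first prefix sum strictly exceeding index.
--     """
--     prefix = []
--     total = 0
--     for chunk in chunk_list:
--         total += chunk['token_num']
--         prefix.append(total)
--     for chunk_idx, p in enumerate(prefix):
--         if p > index:
--             return chunk_idx
--     return None
-- ===== Notes on version B (the rewrite author's own statement) =====
-- stated objective: alternative
-- what changed: Replaces the single accumulating scan with early return by a two-pass structure: first materialise the prefix-sum table of token counts, then search that table for the first entry strictly greater than index.
-- outside the precondition, e.g. on find_chunk_by_index([{'token_num': 5}, {'other': 1}], 3): A returns 0, B raises KeyError
import Mathlib
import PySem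

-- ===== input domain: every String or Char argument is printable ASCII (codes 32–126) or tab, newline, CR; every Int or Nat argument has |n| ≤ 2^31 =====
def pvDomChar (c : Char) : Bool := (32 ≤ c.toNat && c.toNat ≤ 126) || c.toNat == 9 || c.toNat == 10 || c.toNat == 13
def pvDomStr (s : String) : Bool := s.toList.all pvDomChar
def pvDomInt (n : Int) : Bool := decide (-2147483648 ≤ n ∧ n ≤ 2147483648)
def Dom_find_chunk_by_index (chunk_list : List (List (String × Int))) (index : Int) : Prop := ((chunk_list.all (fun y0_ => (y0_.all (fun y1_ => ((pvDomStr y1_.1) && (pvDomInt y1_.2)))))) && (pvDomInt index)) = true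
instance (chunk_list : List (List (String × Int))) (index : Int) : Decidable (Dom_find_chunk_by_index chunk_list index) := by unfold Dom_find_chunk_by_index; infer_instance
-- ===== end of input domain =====

-- B replaces A's accumulating early-return scan by a prefix-sum table built first and
-- then searched for the first entry > index (alternative decomposition, same cost).


-- ===== PORT A =====
-- chunk['token_num']: first-match lookup in the association list (Python dict access;
-- none = KeyError, excluded by Pre_)
def lookupTok : List (String × Int) → Option Int
  | [] => none
  | (k, v) :: rest => if k == "token_num" then some v else lookupTok rest

-- A's loop: accumulate counts, return the current enumerate index as soon as acc > index
def findA : List (List (String × Int)) → Int → Int → Int → Option Int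
  | [], _, _, _ => none
  | chunk :: rest, index, acc, i =>
    match lookupTok chunk with
    | none => none   -- KeyError in Python; outside Pre_
    | some count =>
      if acc + count > index then some i else findA rest index (acc + count) (i + 1)

def find_chunk_by_index (chunk_list : List (List (String × Int))) (index : Int) : Option Int :=
  findA chunk_list index 0 0

-- ===== PORT B =====
-- pass 1 of Source B: the prefix-sum table (none = KeyError during the build; outside Pre_)
def buildPrefix : List (List (String × Int)) → Int → Option (List Int)
  | [], _ => some []
  | chunk :: rest, total =>
    match lookupTok chunk with
    | none => none
    | some count =>
      match buildPrefix rest (total + count) with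
      | none => none
      | some ps => some ((total + count) :: ps)

-- pass 2 of Source B: first position whose table entry exceeds index
def scanPrefix : List Int → Int → Int → Option Int
  | [], _, _ => none
  | p :: rest, index, i => if p > index then some i else scanPrefix rest index (i + 1)

def find_chunk_by_index_alt (chunk_list : List (List (String × Int))) (index : Int) : Option Int :=
  match buildPrefix chunk_list 0 with
  | none => none
  | some prefix_ => scanPrefix prefix_ index 0

-- ===== PRECONDITION & SPEC =====
-- Pre_ excludes inputs with a chunk lacking a 'token_num' key: B's first pass reads every
-- chunk and raises KeyError there, whereas A raises too unless its early return fires first.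
def Pre_find_chunk_by_index (chunk_list : List (List (String × Int))) (index : Int) : Prop :=
  ∀ chunk ∈ chunk_list, "token_num" ∈ chunk.map Prod.fst
instance (chunk_list : List (List (String × Int))) (index : Int) : Decidable (Pre_find_chunk_by_index chunk_list index) := by unfold Pre_find_chunk_by_index; infer_instance

def pvWitness_find_chunk_by_index : (List (List (String × Int))) × Int :=
  ([[("token_num", 3)], [("token_num", 2)]], 4)

def Spec_find_chunk_by_index (chunk_list : List (List (String × Int))) (index : Int) (out : Option Int) : Prop := out = find_chunk_by_index_alt chunk_list index
instance (chunk_list : List (List (String × Int))) (index : Int) (out : Option Int) : Decidable (Spec_find_chunk_by_index chunk_list index out) := by unfold Spec_find_chunk_by_index; infer_instance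

-- ===== CLAIM (what is proved, stated in full; the proofs are below) =====
def Claim_equal_find_chunk_by_index : Prop := ∀ (chunk_list : List (List (String × Int))) (index : Int), Dom_find_chunk_by_index chunk_list index → Pre_find_chunk_by_index chunk_list index → Spec_find_chunk_by_index chunk_list index (find_chunk_by_index chunk_list index)

-- ===== LEMMAS AND PROOFS =====
theorem lookupTok_isSome (chunk : List (String × Int))
    (h : "token_num" ∈ chunk.map Prod.fst) : (lookupTok chunk).isSome = true := by
  induction chunk with
  | nil => simp at h
  | cons p rest ih =>
    simp only [List.map_cons, List.mem_cons] at h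
    obtain ⟨k, v⟩ := p
    simp only [lookupTok]
    split_ifs with hk
    · rfl
    · exact ih (h.resolve_left (fun he => hk (beq_iff_eq.mpr he.symm)))

-- Core invariant: A's accumulating scan from accumulator `acc` and counter `i` equals
-- scanning the prefix table built from running total `acc`, counting from `i`.
theorem findA_eq_scan (cl : List (List (String × Int))) (index acc i : Int)
    (h : ∀ chunk ∈ cl, "token_num" ∈ chunk.map Prod.fst) :
    ∃ ps, buildPrefix cl acc = some ps ∧ findA cl index acc i = scanPrefix ps index i := by
  induction cl generalizing acc i with
  | nil => exact ⟨[], rfl, rfl⟩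
  | cons chunk rest ih =>
    have hc : (lookupTok chunk).isSome = true := lookupTok_isSome chunk (h chunk (List.mem_cons_self ..))
    obtain ⟨count, hcount⟩ := Option.isSome_iff_exists.mp hc
    have hrest := ih (acc + count) (i + 1) (fun c hm => h c (List.mem_cons_of_mem _ hm))
    obtain ⟨ps, hps, heq⟩ := hrest
    refine ⟨(acc + count) :: ps, ?_, ?_⟩
    · simp [buildPrefix, hcount, hps]
    · simp only [findA, hcount, scanPrefix]
      split_ifs with hlt <;> simp [heq]

-- ===== VERDICT (by name: the statement is the Claim_ definition above) =====
theorem find_chunk_by_index_spec : Claim_equal_find_chunk_by_index := by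
  intro cl index _ hpre
  obtain ⟨ps, hps, heq⟩ := findA_eq_scan cl index 0 0 hpre
  unfold Spec_find_chunk_by_index find_chunk_by_index find_chunk_by_index_alt
  rw [hps, heq]
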